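-- pv_equiv track=rewrite | github.com/Kasarlakavyasri/Pichus | arrange_pichus.py | Lcheck
-- ===== SOURCE A (Python) =====
-- def Lcheck(house_map,r,c):
--     if(0<=r<len(house_map) and (0<= c <len(house_map[0]))):
--         if house_map[r][c] in "X@":
--             return True
--         elif house_map[r][c]=="p":
--             return False
--         else:
--             return Lcheck(house_map,r,c-1)
--     return True
-- ===== SOURCE B (Python) =====
-- def Lcheck(house_map, r, c):
--     # Same guard as the task: out-of-range row/column means "blocked" (True).
--     if not (0 <= r < len(house_map) and 0 <= c < len(house_map[0])):
--         return True
--     # Scan the row prefix up to c from right to left: first marker decides.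
--     for ch in reversed(house_map[r][:c + 1]):
--         if ch in "X@":
--             return True
--         if ch == "p":
--             return False
--     return True
-- ===== Notes on version B (the rewrite author's own statement) =====
-- stated objective: simpler
-- what changed: Replaces the recursive leftward walk (which re-checks both row and column bounds at every step) with a single bounds check followed by a linear scan over the reversed row prefix house_map[r][:c+1].
import Mathlib
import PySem

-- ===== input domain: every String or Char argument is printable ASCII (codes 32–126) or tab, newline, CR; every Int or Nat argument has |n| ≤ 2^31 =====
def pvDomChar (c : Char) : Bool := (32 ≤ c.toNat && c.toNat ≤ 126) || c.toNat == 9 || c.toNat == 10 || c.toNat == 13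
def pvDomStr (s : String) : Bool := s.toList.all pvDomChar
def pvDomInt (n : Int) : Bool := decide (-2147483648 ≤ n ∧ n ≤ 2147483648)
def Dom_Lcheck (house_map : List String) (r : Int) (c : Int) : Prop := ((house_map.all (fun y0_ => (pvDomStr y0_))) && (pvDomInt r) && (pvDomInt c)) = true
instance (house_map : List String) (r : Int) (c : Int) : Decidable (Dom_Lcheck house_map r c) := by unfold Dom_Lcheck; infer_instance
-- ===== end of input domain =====

-- B replaces A's recursive leftward walk by one bounds check plus a linear scan of the
-- reversed row prefix; same cost, simpler shape.


-- ===== PORT A =====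
-- literal port of A's recursion; the `none` branches are unreachable under Pre_Lcheck
-- (there Python raises IndexError).
def Lcheck (house_map : List String) (r : Int) (c : Int) : Bool :=
  if _h : 0 ≤ r ∧ r < house_map.length ∧ 0 ≤ c ∧ c < ((house_map.headD "").toList.length : Int) then
    match PySem.List.pyGet? house_map r with
    | none => true
    | some row =>
      match PySem.Str.pyGet? row c with
      | none => true
      | some ch =>
        if ch = 'X' ∨ ch = '@' then true
        else if ch = 'p' then false
        else Lcheck house_map r (c - 1)
  else true
termination_by (c + 1).toNat
decreasing_by omega

-- ===== PORT B =====
-- the right-to-left scan of the sliced prefix (Source B's for-loop)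
def scanLeft : List Char → Bool
  | [] => true
  | ch :: rest =>
    if ch = 'X' ∨ ch = '@' then true
    else if ch = 'p' then false
    else scanLeft rest

def Lcheck_alt (house_map : List String) (r : Int) (c : Int) : Bool :=
  if 0 ≤ r ∧ r < house_map.length ∧ 0 ≤ c ∧ c < ((house_map.headD "").toList.length : Int) then
    match PySem.List.pyGet? house_map r with
    | none => true
    | some row => scanLeft ((row.toList.take (c.toNat + 1)).reverse)
  else true

-- ===== PRECONDITION & SPEC =====
-- Pre_ excludes exactly the ragged maps on which A raises IndexError: the guard passes
-- (c < len(house_map[0])) but column c does not exist in row r.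
def Pre_Lcheck (house_map : List String) (r : Int) (c : Int) : Prop :=
  (0 ≤ r ∧ r < house_map.length ∧ 0 ≤ c ∧ c < ((house_map.headD "").toList.length : Int)) →
    c < (((house_map.getD r.toNat "").toList.length : Int))

instance (house_map : List String) (r : Int) (c : Int) : Decidable (Pre_Lcheck house_map r c) := by
  unfold Pre_Lcheck; infer_instance

def pvWitness_Lcheck : List String × Int × Int := (["X.p"], 0, 2)

def Spec_Lcheck (house_map : List String) (r : Int) (c : Int) (out : Bool) : Prop := out = Lcheck_alt house_map r c
instance (house_map : List String) (r : Int) (c : Int) (out : Bool) : Decidable (Spec_Lcheck house_map r c out) := by unfold Spec_Lcheck; infer_instance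

-- ===== CLAIM (what is proved, stated in full; the proofs are below) =====
def Claim_equal_Lcheck : Prop := ∀ (house_map : List String) (r : Int) (c : Int), Dom_Lcheck house_map r c → Pre_Lcheck house_map r c → Spec_Lcheck house_map r c (Lcheck house_map r c)

-- ===== LEMMAS AND PROOFS =====
lemma key (hm : List String) (r : Int) (row : String)
    (hr0 : 0 ≤ r) (hr1 : r < hm.length)
    (hrow : PySem.List.pyGet? hm r = some row) :
    ∀ (n : Nat), (n : Int) < ((hm.headD "").toList.length : Int) → n < row.toList.length →
      Lcheck hm r (n : Int) = scanLeft ((row.toList.take (n + 1)).reverse) := by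
  intro n
  induction n using Nat.strong_induction_on with
  | _ n ih =>
    intro hlen0 hlenr
    rw [Lcheck]
    have hg : 0 ≤ r ∧ r < hm.length ∧ 0 ≤ (n : Int) ∧ (n : Int) < ((hm.headD "").toList.length : Int) :=
      ⟨hr0, hr1, by positivity, hlen0⟩
    rw [dif_pos hg]
    have hget : PySem.Str.pyGet? row (n : Int) = some (row.toList[n]'hlenr) := by
      rw [PySem.Str.pyGet?_natCast]; simp [List.getElem?_eq_getElem hlenr]
    simp only [hrow, hget]
    have htake : (row.toList.take (n + 1)).reverse
        = (row.toList[n]'hlenr) :: (row.toList.take n).reverse := by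
      rw [List.take_add_one]
      simp [List.getElem?_eq_getElem hlenr]
    rw [htake, scanLeft]
    by_cases hX : row.toList[n]'hlenr = 'X' ∨ row.toList[n]'hlenr = '@'
    · simp [hX]
    · by_cases hp : row.toList[n]'hlenr = 'p'
      · simp [hp]
      · simp only [if_neg hX, if_neg hp]
        cases n with
        | zero =>
          rw [Lcheck]
          simp [scanLeft]
        | succ m =>
          have : ((m + 1 : Nat) : Int) - 1 = (m : Int) := by push_cast; ring
          rw [this, ih m (by omega) (by push_cast at hlen0 ⊢; omega) (by omega)]

theorem Lcheck_spec : Claim_equal_Lcheck := by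
  intro hm r c _ hpre
  unfold Spec_Lcheck Lcheck_alt
  by_cases hg : 0 ≤ r ∧ r < hm.length ∧ 0 ≤ c ∧ c < ((hm.headD "").toList.length : Int)
  · rw [if_pos hg]
    obtain ⟨hr0, hr1, hc0, hc1⟩ := hg
    have hr' : r.toNat < hm.length := by omega
    have hrow : PySem.List.pyGet? hm r = some (hm[r.toNat]'hr') :=
      PySem.List.pyGet?_eq_some_getElem hm (by omega) (by omega)
    rw [hrow]
    have hlenr : c < ((hm[r.toNat]'hr').toList.length : Int) := by
      have hp := hpre ⟨hr0, hr1, hc0, hc1⟩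
      simpa only [List.getD_eq_getElem?_getD, List.getElem?_eq_getElem hr', Option.getD_some] using hp
    have hc : c = ((c.toNat : Nat) : Int) := by omega
    rw [hc]
    exact key hm r _ hr0 hr1 hrow c.toNat (by omega) (by omega)
  · rw [if_neg hg, Lcheck, dif_neg hg]
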